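-- pv_equiv track=rewrite | github.com/hacksparr0w/aoc_2024 | d09p01.py | is_fragmented
-- ===== SOURCE A (Python) =====
-- def is_fragmented(ids):
--     found_space = False
--
--     for id in ids:
--         if id is None:
--             found_space = True
--         elif found_space:
--             return True
--
--     return False
-- ===== SOURCE B (Python) =====
-- def is_fragmented(ids):
--     # A layout is fragmented exactly when, after removing the trailing run of
--     # gaps, a gap still remains (that gap necessarily precedes the last value).
--     lst = list(ids)
--     while lst and lst[-1] is None:
--         lst.pop()
--     return any(x is None for x in lst)
-- ===== Notes on version B (the rewrite author's own statement) =====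
-- stated objective: alternative
-- what changed: Instead of a forward flag-carrying scan, B strips the trailing run of gaps from the back (popping) and then decides by whether any gap remains in the stripped layout.
import Mathlib
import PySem

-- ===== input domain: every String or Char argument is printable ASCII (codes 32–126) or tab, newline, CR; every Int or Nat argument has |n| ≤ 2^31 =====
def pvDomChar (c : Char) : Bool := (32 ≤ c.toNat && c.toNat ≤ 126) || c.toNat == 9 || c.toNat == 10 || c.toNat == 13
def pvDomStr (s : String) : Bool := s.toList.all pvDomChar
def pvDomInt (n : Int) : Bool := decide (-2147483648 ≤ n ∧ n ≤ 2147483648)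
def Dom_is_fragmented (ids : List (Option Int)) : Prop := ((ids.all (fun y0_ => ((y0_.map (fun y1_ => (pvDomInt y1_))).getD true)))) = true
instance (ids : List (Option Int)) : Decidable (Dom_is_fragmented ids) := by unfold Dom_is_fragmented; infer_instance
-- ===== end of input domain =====

-- B decides fragmentation by popping the trailing run of gaps off the back and checking whether a gap remains, instead of A's forward flag-carrying scan: an alternative characterisation, same O(n) cost.


-- ===== PORT A =====
-- A's loop with the found_space flag and the early return True
def isFragLoop (found_space : Bool) : List (Option Int) → Bool
  | [] => false
  | id :: rest =>
    match id with
    | none => isFragLoop true rest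
    | some _ => if found_space then true else isFragLoop found_space rest

def is_fragmented (ids : List (Option Int)) : Bool := isFragLoop false ids

-- ===== PORT B =====
-- 'while lst and lst[-1] is None: lst.pop()'
def popTrailing (l : List (Option Int)) : List (Option Int) :=
  if h : l ≠ [] ∧ l.getLast? = some none then popTrailing l.dropLast else l
termination_by l.length
decreasing_by
  have : 0 < l.length := List.length_pos_iff.mpr h.1
  simp [List.length_dropLast]; omega

-- 'return any(x is None for x in lst)'
def is_fragmented_alt (ids : List (Option Int)) : Bool :=
  (popTrailing ids).any (fun x => x.isNone)

-- ===== PRECONDITION & SPEC =====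
def Spec_is_fragmented (ids : List (Option Int)) (out : Bool) : Prop := out = is_fragmented_alt ids
instance (ids : List (Option Int)) (out : Bool) : Decidable (Spec_is_fragmented ids out) := by unfold Spec_is_fragmented; infer_instance

-- ===== CLAIM (what is proved, stated in full; the proofs are below) =====
def Claim_equal_is_fragmented : Prop := ∀ (ids : List (Option Int)), Dom_is_fragmented ids → Spec_is_fragmented ids (is_fragmented ids)

-- ===== LEMMAS AND PROOFS =====
theorem popTrailing_nil : popTrailing [] = [] := by
  unfold popTrailing; simp

theorem popTrailing_append_none (l : List (Option Int)) :
    popTrailing (l ++ [none]) = popTrailing l := by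
  rw [popTrailing]
  simp

theorem popTrailing_append_some (l : List (Option Int)) (v : Int) :
    popTrailing (l ++ [some v]) = l ++ [some v] := by
  rw [popTrailing]
  simp

theorem frag_append_none (b : Bool) (l : List (Option Int)) :
    isFragLoop b (l ++ [none]) = isFragLoop b l := by
  induction l generalizing b with
  | nil => cases b <;> rfl
  | cons h t ih => cases h <;> cases b <;> simp [isFragLoop, ih]

theorem frag_append_some (b : Bool) (l : List (Option Int)) (v : Int) :
    isFragLoop b (l ++ [some v]) = (isFragLoop b l || b || l.any (fun x => x.isNone)) := by
  induction l generalizing b with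
  | nil => cases b <;> rfl
  | cons h t ih => cases h <;> cases b <;> simp [isFragLoop, ih]

theorem frag_any_none (l : List (Option Int)) :
    isFragLoop false l = true → l.any (fun x => x.isNone) = true := by
  induction l with
  | nil => simp [isFragLoop]
  | cons h t ih =>
    cases h with
    | none => simp
    | some v =>
      intro h'
      have := ih (by simpa [isFragLoop] using h')
      simp [List.any_cons, this]

theorem main_eq (l : List (Option Int)) :
    isFragLoop false l = is_fragmented_alt l := by
  induction l using List.reverseRecOn with
  | nil => simp [isFragLoop, is_fragmented_alt, popTrailing_nil]
  | append_singleton t a ih =>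
    cases a with
    | none =>
      simp only [is_fragmented_alt, popTrailing_append_none, frag_append_none]
      exact ih
    | some v =>
      simp only [is_fragmented_alt, popTrailing_append_some, frag_append_some]
      cases hf : isFragLoop false t with
      | false => simp
      | true => simp [frag_any_none t hf]

-- ===== VERDICT (by name: the statement is the Claim_ definition above) =====
theorem is_fragmented_spec : Claim_equal_is_fragmented := by
  intro ids _
  unfold Spec_is_fragmented is_fragmented
  exact main_eq ids
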